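-- pv_equiv track=rewrite | github.com/vuhiep98/Spelling-Correction | ultis.py | decode_numbers
-- ===== SOURCE A (Python) =====
-- NUMBER = "#"
--
-- def decode_numbers(text, numbers):
-- 	new_text = ""
-- 	cnt = 0
-- 	for c in text:
-- 		if c == NUMBER:
-- 			new_text += numbers[cnt]
-- 			cnt += 1
-- 		else:
-- 			new_text += c
-- 	return new_text
-- ===== SOURCE B (Python) =====
-- NUMBER = "#"
--
-- def decode_numbers(text, numbers):
--     parts = text.split(NUMBER)
--     out = []
--     for i, part in enumerate(parts):
--         out.append(part)
--         if i < len(parts) - 1: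
--             out.append(numbers[i])
--     return "".join(out)
-- ===== Notes on version B (the rewrite author's own statement) =====
-- stated objective: faster
-- what changed: Replaces the per-character scan with quadratic '+=' string accumulation by splitting on '#' once and interleaving the segments with the numbers into a list joined at the end.
import Mathlib
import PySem

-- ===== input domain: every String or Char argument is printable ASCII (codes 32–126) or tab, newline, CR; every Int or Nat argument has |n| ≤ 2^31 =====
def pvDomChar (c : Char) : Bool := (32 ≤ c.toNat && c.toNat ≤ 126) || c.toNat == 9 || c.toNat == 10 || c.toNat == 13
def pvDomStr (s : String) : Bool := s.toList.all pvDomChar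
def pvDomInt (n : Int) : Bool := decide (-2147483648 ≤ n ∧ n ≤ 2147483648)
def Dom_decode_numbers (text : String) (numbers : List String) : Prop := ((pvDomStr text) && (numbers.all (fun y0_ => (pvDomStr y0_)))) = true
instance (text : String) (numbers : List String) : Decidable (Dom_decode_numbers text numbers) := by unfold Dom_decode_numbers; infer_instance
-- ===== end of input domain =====

-- B replaces A's per-character scan with '+=' accumulation by one split on '#' and an
-- interleaving pass over the segments, joined at the end (objective: faster, constant-factor).

-- ===== PORT A =====
-- A: scan text character by character, appending numbers[cnt] at each '#'.
def decode_numbers (text : String) (numbers : List String) : String :=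
  String.ofList (text.toList.foldl
    (fun (st : List Char × Int) c =>
      if c = '#' then (st.1 ++ (PySem.List.pyGetD numbers st.2 "").toList, st.2 + 1)
      else (st.1 ++ [c], st.2))
    ([], 0)).1

-- ===== PORT B =====
-- B: parts = text.split('#'); interleave parts with numbers[i]; ''.join at the end.
def decode_numbers_alt (text : String) (numbers : List String) : String :=
  let parts := PySem.Chars.splitOn text.toList "#".toList
  let out := (PySem.List.enumerate parts).foldl
    (fun (acc : List (List Char)) (ip : Int × List Char) =>
      let acc' := acc ++ [ip.2]
      if ip.1 < PySem.List.len parts - 1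
      then acc' ++ [(PySem.List.pyGetD numbers ip.1 "").toList]
      else acc')
    []
  String.ofList (PySem.Chars.join [] out)

-- ===== PRECONDITION & SPEC =====
-- Pre_ excludes exactly the inputs where Python A raises IndexError: more '#' in text than numbers.
def Pre_decode_numbers (text : String) (numbers : List String) : Prop :=
  PySem.Str.count text "#" ≤ numbers.length
instance (text : String) (numbers : List String) : Decidable (Pre_decode_numbers text numbers) := by unfold Pre_decode_numbers; infer_instance
def pvWitness_decode_numbers : String × List String := ("a#b#c", ["1", "22"])

def Spec_decode_numbers (text : String) (numbers : List String) (out : String) : Prop := out = decode_numbers_alt text numbers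
instance (text : String) (numbers : List String) (out : String) : Decidable (Spec_decode_numbers text numbers out) := by unfold Spec_decode_numbers; infer_instance

-- ===== CLAIM (what is proved, stated in full; the proofs are below) =====
def Claim_equal_decode_numbers : Prop := ∀ (text : String) (numbers : List String), Dom_decode_numbers text numbers → Pre_decode_numbers text numbers → Spec_decode_numbers text numbers (decode_numbers text numbers)

-- ===== LEMMAS AND PROOFS =====

-- the common spec: the decoded character list, consuming numbers from index k
def gSpec (nums : List String) : List Char → Int → List Char
  | [], _ => []
  | c :: cs, k =>
    if c = '#' then (PySem.List.pyGetD nums k "").toList ++ gSpec nums cs (k + 1)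
    else c :: gSpec nums cs k

-- a simple structural split on '#' (proof-side mirror of PySem.Chars.splitOn)
def mySplit : List Char → List Char → List (List Char)
  | [], cur => [cur.reverse]
  | c :: rest, cur => if c = '#' then cur.reverse :: mySplit rest [] else mySplit rest (c :: cur)

theorem go_eq (fuel : Nat) : ∀ (l cur : List Char) (acc : List (List Char)) (_ : l.length < fuel),
    PySem.Chars.splitOn.go ['#'] fuel l cur acc = acc.reverse ++ mySplit l cur := by
  induction fuel with
  | zero => intro l cur acc h; omega
  | succ n ih =>
    intro l cur acc h
    cases l with
    | nil =>
      rw [PySem.Chars.splitOn.go]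
      simp [mySplit]
      omega
    | cons c rest =>
      rw [PySem.Chars.splitOn.go]
      by_cases hc : c = '#'
      · subst hc
        have hp : (['#'].isPrefixOf ('#' :: rest)) = true := by simp [List.isPrefixOf]
        simp only [hp, if_true, List.length_cons, List.length_nil, List.drop_succ_cons, List.drop_zero]
        rw [ih rest [] _ (by simpa using Nat.lt_of_succ_lt_succ h)]
        simp [mySplit]
      · have hp : (['#'].isPrefixOf (c :: rest)) = false := by
          simp [List.isPrefixOf]
          exact fun h => hc (Eq.symm h)
        simp only [hp, Bool.false_eq_true, if_false]
        rw [ih rest (c :: cur) acc (by simpa using Nat.lt_of_succ_lt_succ h)]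
        simp [mySplit, hc]

theorem splitOn_eq (l : List Char) : PySem.Chars.splitOn l ['#'] = mySplit l [] := by
  unfold PySem.Chars.splitOn
  rw [go_eq (l.length + 1) l [] [] (by omega)]
  simp

theorem mySplit_ne_nil (cs cur : List Char) : mySplit cs cur ≠ [] := by
  induction cs generalizing cur with
  | nil => simp [mySplit]
  | cons c rest ih =>
    by_cases hc : c = '#'
    · simp [mySplit, hc]
    · simp [mySplit, hc]; exact ih _

-- the join of the interleaving of split segments with numbers, starting at index k
def joinInter (nums : List String) : List (List Char) → Int → List Char
  | [], _ => []
  | [p], _ => p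
  | p :: q :: ps, k => p ++ (PySem.List.pyGetD nums k "").toList ++ joinInter nums (q :: ps) (k + 1)

theorem joinInter_mySplit (nums : List String) (cs : List Char) : ∀ (cur : List Char) (k : Int),
    joinInter nums (mySplit cs cur) k = cur.reverse ++ gSpec nums cs k := by
  induction cs with
  | nil => intro cur k; simp [mySplit, joinInter, gSpec]
  | cons c rest ih =>
    intro cur k
    by_cases hc : c = '#'
    · subst hc
      simp only [mySplit, if_true]
      obtain ⟨q, ps, hqs⟩ : ∃ q ps, mySplit rest [] = q :: ps := by
        cases h : mySplit rest [] with
        | nil => exact absurd h (mySplit_ne_nil rest [])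
        | cons q ps => exact ⟨q, ps, rfl⟩
      rw [hqs, joinInter, ← hqs, ih [] (k + 1), gSpec]
      simp
    · simp only [mySplit, hc, if_false]
      rw [ih (c :: cur) k, gSpec]
      simp [hc]

-- A's fold computes gSpec (with the running '#'-count as second component)
theorem foldA_eq (nums : List String) (cs : List Char) : ∀ (acc : List Char) (k : Int),
    cs.foldl
      (fun (st : List Char × Int) c =>
        if c = '#' then (st.1 ++ (PySem.List.pyGetD nums st.2 "").toList, st.2 + 1)
        else (st.1 ++ [c], st.2))
      (acc, k)
    = (acc ++ gSpec nums cs k, k + cs.count '#') := by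
  induction cs with
  | nil => intro acc k; simp [gSpec]
  | cons c rest ih =>
    intro acc k
    by_cases hc : c = '#'
    · subst hc
      simp only [List.foldl_cons, if_true, ih, gSpec, List.count_cons]
      simp
      omega
    · simp only [List.foldl_cons, hc, if_false, ih, gSpec, List.count_cons]
      simp [hc]

theorem join_nil_eq_flatten (out : List (List Char)) : PySem.Chars.join [] out = out.flatten := by
  induction out with
  | nil => rfl
  | cons p ps ih =>
    cases ps with
    | nil => simp [PySem.Chars.join, List.intercalate]
    | cons q qs =>
      simp only [PySem.Chars.join, List.intercalate] at *
      simp_all [List.intersperse]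

-- B's interleaving fold computes joinInter
theorem foldB_eq (nums : List String) (n : Int) (l : List (List Char)) :
    ∀ (k : Int) (acc : List (List Char)), k + l.length = n →
    ((PySem.List.enumerate l k).foldl
      (fun (acc : List (List Char)) (ip : Int × List Char) =>
        let acc' := acc ++ [ip.2]
        if ip.1 < n - 1 then acc' ++ [(PySem.List.pyGetD nums ip.1 "").toList] else acc')
      acc).flatten
    = acc.flatten ++ joinInter nums l k := by
  induction l with
  | nil => intro k acc h; simp [PySem.List.enumerate, joinInter]
  | cons p t ih =>
    intro k acc h
    cases t with
    | nil =>
      have hk : ¬ (k < n - 1) := by simp at h; omega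
      simp [PySem.List.enumerate, joinInter, hk]
    | cons q ps =>
      have hk : k < n - 1 := by simp at h; omega
      rw [PySem.List.enumerate_cons, List.foldl_cons]
      simp only [hk, if_true]
      rw [ih (k + 1) _ (by simp at h ⊢; omega)]
      simp [joinInter]

-- ===== VERDICT (by name: the statement is the Claim_ definition above) =====
theorem decode_numbers_spec : Claim_equal_decode_numbers := by
  intro text numbers _ _
  unfold Spec_decode_numbers decode_numbers decode_numbers_alt
  rw [foldA_eq numbers text.toList [] 0]
  have hsplit : PySem.Chars.splitOn text.toList "#".toList = mySplit text.toList [] := by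
    have : "#".toList = ['#'] := rfl
    rw [this, splitOn_eq]
  simp only [hsplit, join_nil_eq_flatten]
  rw [foldB_eq numbers (PySem.List.len (mySplit text.toList [])) (mySplit text.toList []) 0 []
        (by simp [PySem.List.len_eq])]
  rw [joinInter_mySplit numbers text.toList [] 0]
  simp
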